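-- pv_equiv track=rewrite | github.com/gabb117/python-programming | 58_tax_code.py | surname_calc
-- ===== SOURCE A (Python) =====
-- vowels = "aeiouAEIOU"  #Creates a string with all vowels, both lowercase and uppercase.
--
-- def surname_calc(surname):
--     #Create two empty lists:
--     cons = [] #cons: to collect consonants
--     vow = []  #vow: to collect vowels
--
--     for x in surname:  #Scroll through each letter x of the last name
--         if x in vowels:
--             vow.append(x)  #If it is a vowel, it puts it in vow
--         else:
--             cons.append(x)  #If it is a consonant, it puts it in cons
--
--     codeSurname = "".join(cons + vow + ['x'] * 2) [0:3]
--     #Combine three lists: list of consonants, list of vowels and a list of two characters 'x' and the take the first three letter by [0:3]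
--     #all elements of lists joined in a single string
--     return codeSurname.upper()
-- ===== SOURCE B (Python) =====
-- vowels = "aeiouAEIOU"  # same membership string as A
--
-- def surname_calc(surname):
--     # Streaming algorithm with O(1) state: keep only the (at most 3) characters
--     # that can still appear in the code, instead of building full partition lists.
--     # Invariant: code == first 3 chars of (consonants-so-far + vowels-so-far),
--     # ncons == number of consonants held in code (capped at 3).
--     code = []
--     ncons = 0
--     for x in surname:
--         if x in vowels:
--             if len(code) < 3:
--                 code.append(x)
--         elif ncons < 3:
--             code.insert(ncons, x)   # consonant goes right after the consonants kept
--             ncons += 1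
--             del code[3:]            # a displaced vowel can never come back
--     return ''.join((code + ['x', 'x'])[:3]).upper()
-- ===== Notes on version B (the rewrite author's own statement) =====
-- stated objective: alternative
-- what changed: Replaced the two unbounded partition lists with a single streaming pass keeping an O(1) bounded buffer: at most 3 candidate characters plus a consonant count, inserting each consonant before the retained vowels and discarding anything past position 3 immediately.
import Mathlib
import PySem

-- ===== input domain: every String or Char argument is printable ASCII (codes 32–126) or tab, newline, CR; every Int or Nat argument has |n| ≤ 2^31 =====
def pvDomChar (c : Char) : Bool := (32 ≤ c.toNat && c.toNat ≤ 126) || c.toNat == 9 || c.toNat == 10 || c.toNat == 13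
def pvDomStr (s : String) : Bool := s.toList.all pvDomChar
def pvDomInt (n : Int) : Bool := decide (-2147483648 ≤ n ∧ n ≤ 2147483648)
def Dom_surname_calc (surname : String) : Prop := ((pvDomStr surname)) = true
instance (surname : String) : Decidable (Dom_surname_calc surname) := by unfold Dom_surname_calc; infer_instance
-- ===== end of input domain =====

-- B replaces A's two unbounded partition lists with a one-pass bounded (≤3 chars) buffer; same outputs.

def pvVowels : List Char := "aeiouAEIOU".toList

-- ===== PORT A =====
-- the for-loop appending each char to cons or vow
def pvPartitionStep (acc : List Char × List Char) (x : Char) : List Char × List Char :=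
  if x ∈ pvVowels then (acc.1, acc.2 ++ [x]) else (acc.1 ++ [x], acc.2)

def surname_calc (surname : String) : String :=
  let p := surname.toList.foldl pvPartitionStep ([], [])
  -- "".join(cons + vow + ['x']*2)[0:3] then .upper(), over List Char
  let codeSurname := PySem.List.slice (p.1 ++ p.2 ++ List.replicate 2 'x') (some 0) (some 3)
  String.ofList (PySem.Chars.upper codeSurname)

-- ===== PORT B =====
-- loop body of Source B; state = (code, ncons). ncons is a Python int that stays in 0..3,
-- ported as Nat; code.insert(ncons, x) is exact as insertIdx since ncons ≤ len(code),
-- and 'del code[3:]' is 'take 3'.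
def pvStep (st : List Char × Nat) (x : Char) : List Char × Nat :=
  if x ∈ pvVowels then
    if st.1.length < 3 then (st.1 ++ [x], st.2) else st
  else if st.2 < 3 then
    ((st.1.insertIdx st.2 x).take 3, st.2 + 1)
  else st

def surname_calc_alt (surname : String) : String :=
  let st := surname.toList.foldl pvStep ([], 0)
  -- ''.join((code + ['x','x'])[:3]).upper(), over List Char
  String.ofList (PySem.Chars.upper (PySem.List.slice (st.1 ++ ['x', 'x']) none (some 3)))

-- ===== PRECONDITION & SPEC =====
def Spec_surname_calc (surname : String) (out : String) : Prop := out = surname_calc_alt surname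
instance (surname : String) (out : String) : Decidable (Spec_surname_calc surname out) := by unfold Spec_surname_calc; infer_instance

-- ===== CLAIM (what is proved, stated in full; the proofs are below) =====
def Claim_equal_surname_calc : Prop := ∀ (surname : String), Dom_surname_calc surname → Spec_surname_calc surname (surname_calc surname)

-- ===== LEMMAS AND PROOFS =====

-- Python list.insert at an in-range position, as take/cons/drop.
theorem pvInsertIdx_eq (l : List Char) (n : Nat) (a : Char) (h : n ≤ l.length) :
    l.insertIdx n a = l.take n ++ a :: l.drop n := by
  induction l generalizing n with
  | nil => simp_all
  | cons b l ih =>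
    cases n with
    | zero => simp [List.insertIdx]
    | succ n => simp [List.insertIdx_succ_cons, ih n (by simpa using h)]

-- A's loop computes the two filters, appended to the accumulators.
theorem pvFoldl_partition (xs : List Char) (c0 v0 : List Char) :
    xs.foldl pvPartitionStep (c0, v0)
      = (c0 ++ xs.filter (fun c => decide (c ∉ pvVowels)), v0 ++ xs.filter (fun c => decide (c ∈ pvVowels))) := by
  induction xs generalizing c0 v0 with
  | nil => simp
  | cons x xs ih =>
    by_cases hx : x ∈ pvVowels <;>
      simp [pvPartitionStep, hx, ih, List.append_assoc]

-- B's loop invariant: the buffer is the first 3 of (consonants ++ vowels) seen so far,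
-- and ncons counts the consonants held (capped at 3).
theorem pvFoldl_stream (xs : List Char) :
    xs.foldl pvStep ([], 0)
      = (((xs.filter (fun c => decide (c ∉ pvVowels))) ++ (xs.filter (fun c => decide (c ∈ pvVowels)))).take 3,
         min 3 (xs.filter (fun c => decide (c ∉ pvVowels))).length) := by
  induction xs using List.reverseRecOn with
  | nil => simp
  | append_singleton ys x ih =>
    rw [List.foldl_append, ih]
    set C := ys.filter (fun c => decide (c ∉ pvVowels)) with hC
    set V := ys.filter (fun c => decide (c ∈ pvVowels)) with hV
    by_cases hx : x ∈ pvVowels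
    · simp only [List.foldl_cons, List.foldl_nil, pvStep, hx, if_pos, List.filter_append,
        List.filter_cons, List.filter_nil, decide_true, decide_false, not_true,
        Bool.false_eq_true, if_false, List.append_nil, ← hC, ← hV]
      rw [List.take_append, List.take_append (l₁ := C) (l₂ := V ++ [x])]
      rw [List.take_append (l₁ := V) (l₂ := [x])]
      simp only [List.length_take, List.length_append]
      split_ifs with h
      · have hx1 : [x].take (3 - C.length - V.length) = [x] := by
          apply List.take_of_length_le; simp; omega
        rw [hx1]
        have : (3:Nat) - C.length - V.length = 3 - (C.length + V.length) := by omega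
        simp [List.append_assoc]
      · have hx0 : [x].take (3 - C.length - V.length) = [] := by
          have : (3:Nat) - C.length - V.length = 0 := by omega
          simp [this]
        simp [hx0]
    · have hfc : List.filter (fun c => decide (c ∉ pvVowels)) (ys ++ [x]) = C ++ [x] := by
        simp [List.filter_append, hx, hC]
      have hfv : List.filter (fun c => decide (c ∈ pvVowels)) (ys ++ [x]) = V := by
        simp [List.filter_append, hx, ← hV]
      simp only [List.foldl_cons, List.foldl_nil, hfc, hfv]
      unfold pvStep
      rw [if_neg hx]
      split_ifs with h
      · -- fewer than 3 consonants kept: insert right after them, drop past 3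
        have hc3 : C.length < 3 := by omega
        have hmin : min 3 C.length = C.length := by omega
        have htakeC : C.take 3 = C := List.take_of_length_le (by omega)
        have hCV : (C ++ V).take 3 = C ++ V.take (3 - C.length) := by
          rw [List.take_append, htakeC]
        have hlen : C.length ≤ ((C ++ V).take 3).length := by
          rw [hCV]; simp
        have hsucc : (3:Nat) - C.length = (3 - C.length - 1) + 1 := by omega
        have hxt : ∀ (L : List Char), (x :: L).take (3 - C.length)
            = x :: L.take (3 - C.length - 1) := by
          intro L
          rw [hsucc, List.take_succ_cons, Nat.add_sub_cancel]
        have h1 : (C ++ x :: V.take (3 - C.length)).take 3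
            = C ++ x :: V.take (3 - C.length - 1) := by
          rw [List.take_append, htakeC, hxt, List.take_take]
          congr 3
          omega
        have h2 : (C ++ [x] ++ V).take 3 = C ++ x :: V.take (3 - C.length - 1) := by
          rw [List.append_assoc, List.take_append, htakeC, List.singleton_append, hxt]
        have hfst : ((List.take 3 (C ++ V)).insertIdx (min 3 C.length) x).take 3
            = (C ++ [x] ++ V).take 3 := by
          rw [hmin, pvInsertIdx_eq _ _ _ hlen, hCV, List.take_left, List.drop_left, h1, h2]
        have hsnd : min 3 C.length + 1 = min 3 (C ++ [x]).length := by
          simp only [List.length_append, List.length_cons, List.length_nil]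
          omega
        rw [Prod.mk.injEq]
        exact ⟨hfst, hsnd⟩
      · -- three consonants already kept: state unchanged
        have hc3 : 3 ≤ C.length := by omega
        have hz : (3:Nat) - C.length = 0 := by omega
        have h1 : (C ++ V).take 3 = C.take 3 := by
          rw [List.take_append, hz]
          simp
        have h2 : (C ++ [x] ++ V).take 3 = C.take 3 := by
          rw [List.append_assoc, List.take_append, hz]
          simp
        have hsnd : min 3 C.length = min 3 (C ++ [x]).length := by
          simp only [List.length_append, List.length_cons, List.length_nil]
          omega
        rw [Prod.mk.injEq]
        exact ⟨h1.trans h2.symm, hsnd⟩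

-- take 3 ignores anything a take-3 prefix already dropped.
theorem pvTake3_take3_append (L M : List Char) : (L.take 3 ++ M).take 3 = (L ++ M).take 3 := by
  rw [List.take_append, List.take_append, List.take_take, List.length_take]
  have h1 : min 3 3 = 3 := rfl
  have h2 : 3 - min 3 L.length = 3 - L.length := by omega
  rw [h1, h2]

-- ===== VERDICT (by name: the statement is the Claim_ definition above) =====
theorem surname_calc_spec : Claim_equal_surname_calc := by
  intro surname _
  unfold Spec_surname_calc surname_calc surname_calc_alt
  rw [pvFoldl_stream, pvFoldl_partition]
  simp only [List.nil_append, PySem.List.slice_zero_start]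
  rw [show ((3:Int) = ((3:Nat):Int)) from rfl, PySem.List.slice_to_natCast, PySem.List.slice_to_natCast]
  rw [pvTake3_take3_append]
  simp [List.replicate, List.append_assoc]
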